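-- pv_equiv track=rewrite | github.com/pvaras8/PockLigGPT | scripts/sample_selfies_ppo_pocket_cross.py | split_selfies
-- ===== SOURCE A (Python) =====
-- def split_selfies(selfies: str):
--     tokens = []
--     token  = ""
--     for char in selfies:
--         token += char
--         if char == "]":
--             tokens.append(token)
--             token = ""
--     return tokens
-- ===== SOURCE B (Python) =====
-- def split_selfies(selfies: str):
--     parts = selfies.split("]")
--     return [seg + "]" for seg in parts[:-1]]
-- ===== Notes on version B (the rewrite author's own statement) =====
-- stated objective: faster
-- what changed: Replaces the stateful per-character accumulation loop by a single str.split on the closing bracket followed by re-appending the bracket to every segment except the trailing remainder.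
import Mathlib
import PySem

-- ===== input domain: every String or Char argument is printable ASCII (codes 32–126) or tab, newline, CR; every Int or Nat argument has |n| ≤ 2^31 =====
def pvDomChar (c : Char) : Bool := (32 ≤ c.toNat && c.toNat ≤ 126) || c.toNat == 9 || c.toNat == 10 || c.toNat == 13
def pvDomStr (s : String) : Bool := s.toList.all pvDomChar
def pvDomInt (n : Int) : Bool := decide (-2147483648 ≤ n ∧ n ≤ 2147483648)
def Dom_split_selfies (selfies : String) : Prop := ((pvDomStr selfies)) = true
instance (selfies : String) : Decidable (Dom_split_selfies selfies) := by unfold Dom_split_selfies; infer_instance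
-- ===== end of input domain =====

-- B replaces A's stateful per-character accumulation loop by one split(']') plus re-appending ']' (measurably faster: C-level split instead of a Python-level loop).

-- ===== PORT A =====
-- the running token is kept as its list of characters (a Python str, exact); tokens.append → ++ [·]
def split_selfies (selfies : String) : List String :=
  (selfies.toList.foldl
    (fun (st : List String × List Char) char =>
      let token := st.2 ++ [char]
      if char = ']' then (st.1 ++ [String.mk token], []) else (st.1, token))
    ([], [])).1

-- ===== PORT B =====
-- parts = selfies.split("]")  →  PySem.Chars.splitOn (exact for a nonempty separator);
-- parts[:-1] → List.dropLast (equal to the [:-1] slice on every list); seg + "]" → seg ++ [']']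
def split_selfies_alt (selfies : String) : List String :=
  let parts := PySem.Chars.splitOn selfies.toList [']']
  parts.dropLast.map (fun seg => String.mk (seg ++ [']']))

-- ===== PRECONDITION & SPEC =====
def Spec_split_selfies (selfies : String) (out : List String) : Prop := out = split_selfies_alt selfies
instance (selfies : String) (out : List String) : Decidable (Spec_split_selfies selfies out) := by unfold Spec_split_selfies; infer_instance

-- ===== CLAIM (what is proved, stated in full; the proofs are below) =====
def Claim_equal_split_selfies : Prop := ∀ (selfies : String), Dom_split_selfies selfies → Spec_split_selfies selfies (split_selfies selfies)

-- ===== LEMMAS AND PROOFS =====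

-- structural description of splitOn with the single-character separator ']'
def pvSegs : List Char → List Char → List (List Char)
  | pre, [] => [pre]
  | pre, c :: rest => if c = ']' then pre :: pvSegs [] rest else pvSegs (pre ++ [c]) rest

theorem pvSegs_ne_nil (pre l : List Char) : pvSegs pre l ≠ [] := by
  induction l generalizing pre with
  | nil => simp [pvSegs]
  | cons c rest ih =>
    simp only [pvSegs]
    split_ifs <;> simp [ih]

theorem pvGo_eq_segs (fuel : Nat) (l cur : List Char) (acc : List (List Char))
    (h : l.length ≤ fuel) :
    PySem.Chars.splitOn.go [']'] fuel l cur acc = acc.reverse ++ pvSegs cur.reverse l := by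
  induction fuel generalizing l cur acc with
  | zero =>
    have : l = [] := List.eq_nil_of_length_eq_zero (Nat.le_zero.mp h)
    subst this
    simp [PySem.Chars.splitOn.go, pvSegs]
  | succ fuel ih =>
    cases l with
    | nil => simp [PySem.Chars.splitOn.go, pvSegs]
    | cons c rest =>
      simp only [PySem.Chars.splitOn.go]
      by_cases hc : c = ']'
      · subst hc
        rw [if_pos (by simp [List.isPrefixOf])]
        rw [ih _ _ _ (by simpa using Nat.le_of_succ_le_succ h)]
        simp [pvSegs]
      · rw [if_neg (by simp [List.isPrefixOf, Ne.symm hc])]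
        rw [ih _ _ _ (by simpa using Nat.le_of_succ_le_succ h)]
        simp [pvSegs, hc]

theorem pvSplitOn_eq_segs (l : List Char) :
    PySem.Chars.splitOn l [']'] = pvSegs [] l := by
  show PySem.Chars.splitOn.go [']'] (l.length + 1) l [] [] = _
  rw [pvGo_eq_segs _ _ _ _ (Nat.le_succ _)]
  simp

theorem pvFold_eq (l : List Char) (tokens : List String) (token : List Char) :
    (l.foldl
      (fun (st : List String × List Char) char =>
        let tk := st.2 ++ [char]
        if char = ']' then (st.1 ++ [String.mk tk], []) else (st.1, tk))
      (tokens, token)).1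
    = tokens ++ (pvSegs token l).dropLast.map (fun seg => String.mk (seg ++ [']'])) := by
  induction l generalizing tokens token with
  | nil => simp [pvSegs]
  | cons c rest ih =>
    by_cases hc : c = ']'
    · subst hc
      simp only [List.foldl_cons, if_pos rfl]
      rw [ih]
      have hne := pvSegs_ne_nil [] rest
      simp [pvSegs, List.dropLast_cons_of_ne_nil hne]
    · simp only [List.foldl_cons, if_neg hc]
      rw [ih]
      simp [pvSegs, hc]

-- ===== VERDICT (by name: the statement is the Claim_ definition above) =====
theorem split_selfies_spec : Claim_equal_split_selfies := by
  intro selfies _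
  show split_selfies selfies = split_selfies_alt selfies
  unfold split_selfies split_selfies_alt
  rw [pvSplitOn_eq_segs, pvFold_eq]
  simp
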